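-- pv_equiv track=rewrite | github.com/JuliaGalera16/Ejercicios | Nivel_1/positivos.py | ordena_positivos
-- ===== SOURCE A (Python) =====
-- def ordena_positivos(lista):
--     positivos = sorted([x for x in lista if x > 0])
--
--     resultado = []
--     indice_positivos = 0
--
--     for num in lista:
--         if num > 0:
--             resultado.append(positivos[indice_positivos])
--             indice_positivos += 1
--         else:
--             resultado.append(num)
--
--     return resultado
-- ===== SOURCE B (Python) =====
-- def ordena_positivos(lista):
--     # Selection-based: no sort; at each positive slot extract the minimum of the
--     # remaining multiset of positives.
--     restantes = [x for x in lista if x > 0]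
--     resultado = []
--     for num in lista:
--         if num > 0:
--             m = min(restantes)
--             restantes.remove(m)
--             resultado.append(m)
--         else:
--             resultado.append(num)
--     return resultado
-- ===== Notes on version B (the rewrite author's own statement) =====
-- stated objective: alternative
-- what changed: B does not sort at all: it keeps the multiset of remaining positives and, at each positive slot, extracts its minimum (selection-style min/remove, O(n^2)), instead of A's library sort followed by a linear pass indexing the sorted list with a running counter.
import Mathlib
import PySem

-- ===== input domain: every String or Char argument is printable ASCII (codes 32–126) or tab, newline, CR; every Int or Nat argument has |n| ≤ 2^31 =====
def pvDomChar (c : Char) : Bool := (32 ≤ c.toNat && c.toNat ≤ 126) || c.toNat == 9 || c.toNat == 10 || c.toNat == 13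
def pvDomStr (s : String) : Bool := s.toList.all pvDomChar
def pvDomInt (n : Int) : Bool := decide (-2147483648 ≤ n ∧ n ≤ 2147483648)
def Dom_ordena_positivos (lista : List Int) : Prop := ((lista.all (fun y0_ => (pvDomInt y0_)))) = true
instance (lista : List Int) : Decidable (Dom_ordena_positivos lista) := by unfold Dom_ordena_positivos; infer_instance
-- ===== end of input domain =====

-- B replaces A's library sort + linear pass (running counter into the sorted positives) by a
-- selection-style recursion that extracts the minimum of the remaining positives at each positive
-- slot; objective: alternative algorithm (no sort), O(n^2) instead of O(n log n).

-- ===== PORT A =====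
-- A: positivos[indice_positivos] is always in range (one positive consumed per positive element),
-- so Python never raises; the `.getD 0` total form is never the value actually used.
def ordena_positivos (lista : List Int) : List Int :=
  let positivos := PySem.List.sorted (lista.filter (fun x => decide (0 < x))) (fun x => x) false
  (lista.foldl (fun (s : List Int × Int) num =>
      if 0 < num then (s.1 ++ [(PySem.List.pyGet? positivos s.2).getD 0], s.2 + 1)
      else (s.1 ++ [num], s.2)) ([], 0)).1

-- ===== PORT B =====
-- `restantes` is never empty when a positive slot is reached, so Python's min/remove never raise;
-- the `.getD` total forms are never the values actually used.
def ordena_positivos_alt (lista : List Int) : List Int :=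
  (lista.foldl (fun (s : List Int × List Int) num =>
      if 0 < num then
        let m := (PySem.List.min? s.2 (fun y => y)).getD 0
        (s.1 ++ [m], (PySem.List.remove? s.2 m).getD s.2)
      else (s.1 ++ [num], s.2))
    ([], lista.filter (fun x => decide (0 < x)))).1

-- ===== PRECONDITION & SPEC =====
def Spec_ordena_positivos (lista : List Int) (out : List Int) : Prop := out = ordena_positivos_alt lista
instance (lista : List Int) (out : List Int) : Decidable (Spec_ordena_positivos lista out) := by unfold Spec_ordena_positivos; infer_instance

-- ===== CLAIM (what is proved, stated in full; the proofs are below) =====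
def Claim_equal_ordena_positivos : Prop := ∀ (lista : List Int), Dom_ordena_positivos lista → Spec_ordena_positivos lista (ordena_positivos lista)

-- ===== LEMMAS AND PROOFS =====

-- Proof-side recursive form of B's selection loop.
def pvColoca : List Int → List Int → List Int
  | [], _ => []
  | x :: xs, restantes =>
    if 0 < x then
      let m := (PySem.List.min? restantes (fun y => y)).getD 0
      m :: pvColoca xs ((PySem.List.remove? restantes m).getD restantes)
    else
      x :: pvColoca xs restantes

-- B's fold, generalized over the accumulator, is pvColoca.
theorem pvB_fold :
    ∀ (l : List Int) (acc : List Int) (rem : List Int),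
      (l.foldl (fun (s : List Int × List Int) num =>
        if 0 < num then
          let m := (PySem.List.min? s.2 (fun y => y)).getD 0
          (s.1 ++ [m], (PySem.List.remove? s.2 m).getD s.2)
        else (s.1 ++ [num], s.2)) (acc, rem)).1 = acc ++ pvColoca l rem := by
  intro l
  induction l with
  | nil => intro acc rem; simp [pvColoca]
  | cons x xs ih =>
    intro acc rem
    by_cases hx : 0 < x
    · simp only [List.foldl_cons, if_pos hx, ih]
      simp [pvColoca, hx]
    · simp only [List.foldl_cons, if_neg hx, ih]
      simp [pvColoca, hx]

-- Common reference form: walk the list, replacing each positive element by the next value of `ps`.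
def pvMerge : List Int → List Int → List Int
  | [], _ => []
  | x :: xs, ps =>
    if 0 < x then (ps.head?.getD 0) :: pvMerge xs ps.tail
    else x :: pvMerge xs ps

-- A's loop, generalized over accumulator and counter, is pvMerge of the remaining suffix of P.
theorem pvA_loop (P : List Int) :
    ∀ (l : List Int) (acc : List Int) (n : Nat),
      (l.foldl (fun (s : List Int × Int) num =>
        if 0 < num then (s.1 ++ [(PySem.List.pyGet? P s.2).getD 0], s.2 + 1)
        else (s.1 ++ [num], s.2)) (acc, (n : Int))).1 = acc ++ pvMerge l (P.drop n) := by
  intro l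
  induction l with
  | nil => intro acc n; simp [pvMerge]
  | cons x xs ih =>
    intro acc n
    by_cases hx : 0 < x
    · have h1 : ((n : Int) + 1) = ((n + 1 : Nat) : Int) := by push_cast; ring
      simp only [List.foldl_cons, if_pos hx]
      rw [h1, ih]
      simp [pvMerge, hx, List.tail_drop, List.head?_drop]
    · simp only [List.foldl_cons, if_neg hx]
      rw [ih]
      simp [pvMerge, hx]

-- B's selection recursion equals pvMerge of the sorted remaining multiset: the minimum is the
-- head of the sorted list, and removing it leaves (as a multiset) exactly its tail.
theorem pvB_loop :
    ∀ (xs : List Int) (rem : List Int),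
      pvColoca xs rem = pvMerge xs (PySem.List.sorted rem (fun y => y) false) := by
  intro xs
  induction xs with
  | nil => intro rem; simp [pvColoca, pvMerge]
  | cons x rest ih =>
    intro rem
    by_cases hx : 0 < x
    · cases hrem : rem with
      | nil =>
        have hnil : PySem.List.sorted ([] : List Int) (fun y : Int => y) false = [] := by
          rw [PySem.List.sorted_eq_nil_iff]
        simp [pvColoca, pvMerge, hx, PySem.List.min?, PySem.List.remove?, ih, hnil]
      | cons r rs =>
        -- rem nonempty: sorted rem = m0 :: t, min? rem = some m0
        obtain ⟨m0, t, hst⟩ : ∃ m0 t, PySem.List.sorted rem (fun y : Int => y) false = m0 :: t := by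
          cases h : PySem.List.sorted rem (fun y : Int => y) false with
          | nil =>
            rw [PySem.List.sorted_eq_nil_iff] at h
            simp [hrem] at h
          | cons a b => exact ⟨a, b, rfl⟩
        obtain ⟨m, hm⟩ : ∃ m, PySem.List.min? rem (fun y : Int => y) = some m := by
          cases h : PySem.List.min? rem (fun y : Int => y) with
          | none =>
            rw [PySem.List.min?_eq_none_iff] at h
            simp [hrem] at h
          | some m => exact ⟨m, rfl⟩
        have hmmem : m ∈ rem := PySem.List.min?_mem hm
        have hm0mem : m0 ∈ rem := by
          have := (PySem.List.sorted_perm rem (fun y : Int => y) false).mem_iff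
              (a := m0)
          rw [← this, hst]; simp
        have hmin : ∀ y ∈ rem, m ≤ y := PySem.List.min?_isMin hm
        have hhead : ∀ y ∈ rem, m0 ≤ y := PySem.List.key_head_sorted_le rem (fun y : Int => y) hst
        have hmeq : m = m0 := le_antisymm (hmin m0 hm0mem) (hhead m hmmem)
        have hrm : PySem.List.remove? rem m = some (rem.erase m) :=
          PySem.List.remove?_eq_some_erase rem m hmmem
        have herase : PySem.List.sorted (rem.erase m) (fun y : Int => y) false = t := by
          apply PySem.List.sorted_id_eq_of_perm_of_pairwise
          · have h1 : List.Perm ((m0 :: t).erase m0) (rem.erase m0) :=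
              (hst ▸ PySem.List.sorted_perm rem (fun y : Int => y) false).erase m0
            simp only [List.erase_cons_head] at h1
            rw [hmeq]; exact h1
          · have := PySem.List.sorted_pairwise rem (fun y : Int => y)
            rw [hst] at this
            exact this.of_cons
        rw [← hrem]
        rw [hmeq] at hrm herase
        simp only [pvColoca, if_pos hx, hm, hmeq, hrm, Option.getD_some, ih, herase, hst, pvMerge,
          List.head?_cons, List.tail_cons]
    · simp only [pvColoca, pvMerge, if_neg hx, ih]

-- ===== VERDICT (by name: the statement is the Claim_ definition above) =====
theorem ordena_positivos_spec : Claim_equal_ordena_positivos := by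
  intro lista _
  unfold Spec_ordena_positivos ordena_positivos ordena_positivos_alt
  have hA := pvA_loop (PySem.List.sorted (lista.filter (fun x => decide (0 < x))) (fun x => x) false)
      lista [] 0
  simp only [List.drop_zero, List.nil_append, Nat.cast_zero] at hA
  have hB := pvB_fold lista [] (lista.filter (fun x => decide (0 < x)))
  simp only [List.nil_append] at hB
  rw [hA, hB, pvB_loop]
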